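-- pv_equiv track=rewrite | github.com/liuyaxiong-aims4dc/aims4meta | 工作流/多层鉴定/辅助功能/小牛中文翻译/小牛中文翻译.py | guess_name_column
-- ===== SOURCE A (Python) =====
-- def guess_name_column(columns):
--     """猜测化合物名列（按候选词优先级匹配，最具体的优先）"""
--     candidates = ['matched_name', 'target_compound', 'compound_name', 'candidate_name',
--                  'formula_name', 'identified_name', 'structure_name']
--     columns_lower = {col: col.lower() for col in columns}
--     # 按候选词优先级遍历（最具体的优先匹配）
--     for cand in candidates:
--         for col, col_lower in columns_lower.items():
--             if cand == col_lower:  # 精确匹配优先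
--                 return col
--     for cand in candidates:
--         for col, col_lower in columns_lower.items():
--             if cand in col_lower:  # 子串匹配
--                 return col
--     return None
-- ===== SOURCE B (Python) =====
-- def _rank(low, candidates):
--     for i, cand in enumerate(candidates):
--         if cand == low:
--             return i
--     for i, cand in enumerate(candidates):
--         if cand in low:
--             return len(candidates) + i
--     return 2 * len(candidates)
--
--
-- def guess_name_column(columns):
--     """猜测化合物名列（单遍 argmin：每列算一个优先级名次，保留名次最小且最早出现的列）"""
--     candidates = ['matched_name', 'target_compound', 'compound_name', 'candidate_name',
--                   'formula_name', 'identified_name', 'structure_name']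
--     inf = 2 * len(candidates)
--     best_rank, best_col = inf, None
--     for col in columns:
--         r = _rank(col.lower(), candidates)
--         if r < best_rank:
--             best_rank, best_col = r, col
--     return best_col
-- ===== Notes on version B (the rewrite author's own statement) =====
-- stated objective: alternative
-- what changed: Replaced A's four nested candidate-outer search loops over a precomputed lowercase dict by a single pass over the columns that computes a priority rank per column (exact-match index, else 7+first-substring index, else 14) and keeps the first column with the strictly smallest rank.
import Mathlib
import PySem

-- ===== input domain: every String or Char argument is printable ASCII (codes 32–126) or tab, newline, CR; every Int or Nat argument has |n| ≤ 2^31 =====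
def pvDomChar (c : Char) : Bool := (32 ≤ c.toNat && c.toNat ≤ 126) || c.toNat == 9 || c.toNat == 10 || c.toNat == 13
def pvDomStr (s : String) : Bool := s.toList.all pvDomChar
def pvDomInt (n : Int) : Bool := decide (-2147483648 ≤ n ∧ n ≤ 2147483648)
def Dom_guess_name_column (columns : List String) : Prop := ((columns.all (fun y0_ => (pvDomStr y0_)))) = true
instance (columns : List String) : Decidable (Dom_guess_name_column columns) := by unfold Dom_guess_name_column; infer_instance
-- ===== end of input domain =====

-- B replaces A's four candidate-outer search loops by one strict-argmin pass over the columns with a per-column priority rank (alternative decomposition, same cost).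

-- ===== PORT A =====
def pvCands : List String :=
  ["matched_name", "target_compound", "compound_name", "candidate_name",
   "formula_name", "identified_name", "structure_name"]

def guess_name_column (columns : List String) : Option String :=
  let columnsLower : PySem.Dict String String :=
    columns.foldl (fun d col => d.insert col (PySem.Str.lower col)) PySem.Dict.empty
  match pvCands.findSome? (fun cand =>
      (columnsLower.items.find? (fun p => cand == p.2)).map (fun p => p.1)) with
  | some col => some col
  | none =>
    pvCands.findSome? (fun cand =>
      (columnsLower.items.find? (fun p => PySem.Str.isIn cand p.2)).map (fun p => p.1))

-- ===== PORT B =====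
def pvRankLow (low : String) : Nat :=
  match pvCands.findIdx? (fun cand => cand == low) with
  | some i => i
  | none =>
    match pvCands.findIdx? (fun cand => PySem.Str.isIn cand low) with
    | some i => pvCands.length + i
    | none => 2 * pvCands.length

def guess_name_column_alt (columns : List String) : Option String :=
  (columns.foldl (fun best col =>
      let r := pvRankLow (PySem.Str.lower col)
      if r < best.1 then (r, some col) else best)
    (2 * pvCands.length, (none : Option String))).2

-- ===== PRECONDITION & SPEC =====
def Spec_guess_name_column (columns : List String) (out : Option String) : Prop := out = guess_name_column_alt columns
instance (columns : List String) (out : Option String) : Decidable (Spec_guess_name_column columns out) := by unfold Spec_guess_name_column; infer_instance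

-- ===== CLAIM (what is proved, stated in full; the proofs are below) =====
def Claim_equal_guess_name_column : Prop := ∀ (columns : List String), Dom_guess_name_column columns → Spec_guess_name_column columns (guess_name_column columns)

-- ===== LEMMAS AND PROOFS =====

-- generic machinery: a strict-argmin fold vs a priority search over a predicate list
def pvStep {α : Type} (r : α → Nat) (b : Nat × Option α) (c : α) : Nat × Option α :=
  if r c < b.1 then (r c, some c) else b

def pvRk {α : Type} (ps : List (α → Bool)) (N : Nat) (c : α) : Nat :=
  (ps.findIdx? (fun p => p c)).getD N

theorem pvFold_const {α : Type} (r : α → Nat) :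
    ∀ (xs : List α) (b : Nat × Option α), (∀ a ∈ xs, b.1 ≤ r a) → xs.foldl (pvStep r) b = b := by
  intro xs
  induction xs with
  | nil => intro b _; rfl
  | cons x xs ih =>
    intro b h
    have hx : ¬ r x < b.1 := by
      have := h x (by simp)
      omega
    simp only [List.foldl_cons, pvStep, if_neg hx]
    exact ih b (fun a ha => h a (by simp [ha]))

theorem pvFold_ge {α : Type} (r : α → Nat) :
    ∀ (xs : List α) (b : Nat × Option α) (m : Nat),
      (∀ a ∈ xs, m ≤ r a) → m ≤ b.1 → m ≤ (xs.foldl (pvStep r) b).1 := by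
  intro xs
  induction xs with
  | nil => intro b m _ hb; exact hb
  | cons x xs ih =>
    intro b m h hb
    simp only [List.foldl_cons]
    refine ih _ m (fun a ha => h a (by simp [ha])) ?_
    by_cases hx : r x < b.1
    · simp only [pvStep, if_pos hx]; exact h x (by simp)
    · simp only [pvStep, if_neg hx]; exact hb

theorem pvFold_shift {α : Type} :
    ∀ (xs : List α) (b : Nat × Option α) (r r' : α → Nat),
      (∀ a ∈ xs, r' a = r a + 1) →
      xs.foldl (pvStep r') (b.1 + 1, b.2) =
        ((xs.foldl (pvStep r) b).1 + 1, (xs.foldl (pvStep r) b).2) := by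
  intro xs
  induction xs with
  | nil => intro b r r' _; rfl
  | cons x xs ih =>
    intro b r r' h
    have hx : r' x = r x + 1 := h x (by simp)
    simp only [List.foldl_cons]
    by_cases hlt : r x < b.1
    · have : pvStep r' (b.1 + 1, b.2) x = (r x + 1, some x) := by
        simp [pvStep, hx]; omega
      rw [this]
      have : pvStep r b x = (r x, some x) := by simp [pvStep, hlt]
      rw [this]
      exact ih (r x, some x) r r' (fun a ha => h a (by simp [ha]))
    · have : pvStep r' (b.1 + 1, b.2) x = (b.1 + 1, b.2) := by
        simp only [pvStep, hx]
        rw [if_neg (by omega)]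
      rw [this]
      have : pvStep r b x = b := by simp [pvStep, hlt]
      rw [this]
      exact ih b r r' (fun a ha => h a (by simp [ha]))

theorem pvMain {α : Type} :
    ∀ (ps : List (α → Bool)) (N : Nat) (xs : List α), ps.length ≤ N →
      ps.findSome? (fun p => xs.find? p) =
        (xs.foldl (pvStep (pvRk ps N)) (N, (none : Option α))).2 := by
  intro ps
  induction ps with
  | nil =>
    intro N xs _
    rw [pvFold_const (pvRk [] N) xs (N, none) (by intro a _; simp [pvRk])]
    simp
  | cons p ps ih =>
    intro N xs hlen
    have hN : 1 ≤ N := by simp at hlen; omega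
    have rk0 : ∀ a : α, p a = true → pvRk (p :: ps) N a = 0 := by
      intro a ha; simp [pvRk, List.findIdx?_cons, ha]
    have rkS : ∀ a : α, p a = false → pvRk (p :: ps) N a = pvRk ps (N - 1) a + 1 := by
      intro a ha
      simp only [pvRk, List.findIdx?_cons, ha, Bool.false_eq_true, reduceIte]
      cases h : ps.findIdx? (fun q => q a) with
      | some j => simp
      | none => simp; omega
    rw [List.findSome?_cons]
    cases hfind : xs.find? p with
    | some c =>
      rcases List.find?_eq_some_iff_append.mp hfind with ⟨hc, as, bs, hxs, hpre⟩
      subst hxs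
      rw [List.foldl_append, List.foldl_cons]
      have h1 : 1 ≤ (as.foldl (pvStep (pvRk (p :: ps) N)) (N, (none : Option α))).1 := by
        apply pvFold_ge
        · intro a ha
          have : p a = false := by simpa using hpre a ha
          rw [rkS a this]; omega
        · exact hN
      have hstep : pvStep (pvRk (p :: ps) N)
          (as.foldl (pvStep (pvRk (p :: ps) N)) (N, (none : Option α))) c = (0, some c) := by
        simp [pvStep, rk0 c hc]
        omega
      rw [hstep,
        pvFold_const (pvRk (p :: ps) N) bs (0, some c) (by intro a _; exact Nat.zero_le _)]
    | none =>
      have hall : ∀ a ∈ xs, p a = false := by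
        intro a ha
        have := List.find?_eq_none.mp hfind a ha
        simpa using this
      have hshift := pvFold_shift xs (N - 1, (none : Option α)) (pvRk ps (N - 1)) (pvRk (p :: ps) N)
        (fun a ha => rkS a (hall a ha))
      have hNe : N - 1 + 1 = N := by omega
      rw [hNe] at hshift
      simp only at hshift
      rw [hshift]
      exact ih (N - 1) xs (by simp at hlen ⊢; omega)

-- the fourteen concrete predicates, exact matches first
def pvPsE : List (String → Bool) := pvCands.map (fun cand c => cand == PySem.Str.lower c)
def pvPsS : List (String → Bool) := pvCands.map (fun cand c => PySem.Str.isIn cand (PySem.Str.lower c))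

theorem pvRank_bridge (c : String) :
    pvRk (pvPsE ++ pvPsS) 14 c = pvRankLow (PySem.Str.lower c) := by
  unfold pvRk pvRankLow pvPsE pvPsS
  rw [List.findIdx?_append, List.findIdx?_map, List.findIdx?_map]
  simp only [Function.comp_def]
  cases h1 : pvCands.findIdx? (fun cand => cand == PySem.Str.lower c) with
  | some i => simp
  | none =>
    cases h2 : pvCands.findIdx? (fun cand => PySem.Str.isIn cand (PySem.Str.lower c)) with
    | some i =>
      simp [pvCands]
      omega
    | none => simp [pvCands]

-- the dict built by A maps every inserted column to its lowercase
theorem pvDictGet :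
    ∀ (xs : List String) (d : PySem.Dict String String) (k : String),
      (xs.foldl (fun d col => d.insert col (PySem.Str.lower col)) d).get? k
        = if k ∈ xs then some (PySem.Str.lower k) else d.get? k := by
  intro xs
  induction xs with
  | nil => intro d k; simp
  | cons x xs ih =>
    intro d k
    rw [List.foldl_cons, ih]
    by_cases hk : k ∈ xs
    · simp [hk]
    · rw [PySem.Dict.get?_insert]
      by_cases hkx : k = x
      · subst hkx; simp [hk]
      · simp [hk, hkx]

theorem pvItems (columns : List String) :
    (columns.foldl (fun d col => d.insert col (PySem.Str.lower col)) PySem.Dict.empty).items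
      = (PySem.Set.ofList columns).map (fun k => (k, PySem.Str.lower k)) := by
  have hkeys : (columns.foldl (fun d col => d.insert col (PySem.Str.lower col))
      (PySem.Dict.empty : PySem.Dict String String)).keys = PySem.Set.ofList columns := by
    rw [PySem.Dict.keys_foldl_insert columns (fun _ col => PySem.Str.lower col) PySem.Dict.empty]
    rw [PySem.Dict.keys_empty, PySem.Set.ofList_eq_foldl]
    rfl
  have hnd : (columns.foldl (fun d col => d.insert col (PySem.Str.lower col))
      (PySem.Dict.empty : PySem.Dict String String)).keys.Nodup :=
    PySem.Dict.nodup_keys_foldl_insert columns _ PySem.Dict.empty PySem.Dict.nodup_keys_empty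
  rw [PySem.Dict.items_eq_map_keys _ hnd "", hkeys]
  apply List.map_congr_left
  intro k hk
  have hkc : k ∈ columns := (PySem.Set.mem_ofList columns k).mp hk
  rw [PySem.Dict.getD_eq_get?_getD, pvDictGet, if_pos hkc]
  rfl

-- searching the deduplicated key set finds the same element as searching the column list
theorem pvFindFoldAdd (q : String → Bool) :
    ∀ (xs s : List String),
      (xs.foldl PySem.Set.add s).find? q = (s.find? q).or (xs.find? q) := by
  intro xs
  induction xs with
  | nil => intro s; simp
  | cons x xs ih =>
    intro s
    rw [List.foldl_cons, ih, List.find?_cons]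
    cases hs : s.find? q with
    | some v => simp [PySem.Set.add]; split_ifs <;> simp [hs]
    | none =>
      by_cases hc : PySem.Set.contains s x
      · have hx : x ∈ s := (PySem.Set.contains_iff s x).mp hc
        have hqx : q x = false := by
          have := List.find?_eq_none.mp hs x hx
          simpa using this
        simp [PySem.Set.add, hx, hs, hqx]
      · simp only [PySem.Set.add, hc, Bool.false_eq_true, reduceIte]
        rw [List.find?_append, hs]
        cases hqx : q x <;> simp [hqx]

theorem pvFindSet (q : String → Bool) (xs : List String) :
    (PySem.Set.ofList xs).find? q = xs.find? q := by
  rw [PySem.Set.ofList_eq_foldl, pvFindFoldAdd]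
  simp

theorem pvA_eq (columns : List String) :
    guess_name_column columns = (pvPsE ++ pvPsS).findSome? (fun p => columns.find? p) := by
  unfold guess_name_column
  simp only [pvItems]
  rw [List.findSome?_append]
  unfold pvPsE pvPsS
  rw [List.findSome?_map, List.findSome?_map]
  have hfix : ∀ (pr : String × String → Bool),
      ((((PySem.Set.ofList columns).map (fun k => (k, PySem.Str.lower k))).find? pr).map
        (fun p => p.1)) = columns.find? (fun k => pr (k, PySem.Str.lower k)) := by
    intro pr
    rw [List.find?_map, Option.map_map, ← pvFindSet (fun k => pr (k, PySem.Str.lower k)) columns]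
    have : ((fun p : String × String => p.1) ∘ fun k => (k, PySem.Str.lower k)) = id := rfl
    rw [this, Option.map_id]
    rfl
  simp only [hfix]
  cases h : (pvCands.findSome? fun cand => columns.find? fun k => cand == PySem.Str.lower k) with
  | some v => simp [h, Function.comp_def]
  | none => simp [h, Function.comp_def]

theorem pvB_eq (columns : List String) :
    guess_name_column_alt columns =
      (columns.foldl (pvStep (pvRk (pvPsE ++ pvPsS) 14)) (14, (none : Option String))).2 := by
  unfold guess_name_column_alt
  have hf : (fun (best : Nat × Option String) col =>
        let r := pvRankLow (PySem.Str.lower col)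
        if r < best.1 then (r, some col) else best)
      = pvStep (pvRk (pvPsE ++ pvPsS) 14) := by
    funext b c
    simp [pvStep, pvRank_bridge]
  rw [hf]
  rfl

-- ===== VERDICT (by name: the statement is the Claim_ definition above) =====
theorem guess_name_column_spec : Claim_equal_guess_name_column := by
  intro columns _
  unfold Spec_guess_name_column
  rw [pvA_eq, pvB_eq, pvMain (pvPsE ++ pvPsS) 14 columns
    (by simp [pvPsE, pvPsS, pvCands])]
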